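-- pv_equiv track=rewrite | github.com/ljwljy51/Algorithm | Programmers/코딩테스트_고득점_Kit/DynamicProgramming/level3_N으로표현.py | solution
-- ===== SOURCE A (Python) =====
-- from collections import defaultdict
--
-- def solution(N, number):
--     dp = defaultdict(set)  # dp[i]: N을 i번 사용해 만들 수 있는 수들의 집합
--
--     for i in range(1, 9):
--         dp[i].add(int(str(N) * i))  # N을 i번 이어붙인 수
--         for j in range(1, i):  # n을 몇 번 사용한 결과에 접근하는가에 주목
--             for op1 in dp[j]:
--                 for op2 in dp[i - j]:
--                     dp[i].add(op1 + op2)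
--                     dp[i].add(op1 - op2)
--                     dp[i].add(op1 * op2)
--                     if op2 != 0:
--                         dp[i].add(op1 // op2)
--         if number in dp[i]:
--             return i
--
--     return -1  # N의 사용 횟수가 8을 넘기는 경우
-- ===== SOURCE B (Python) =====
-- def solution(N, number):
--     # Top-down memoized recursion over the number of copies of N, with the
--     # combinations of each split collected by a set comprehension.
--     memo = {}
--
--     def reach(i):
--         if i not in memo:
--             vals = {int(str(N) * i)}
--             for j in range(1, i):
--                 vals |= {r
--                          for b in reach(i - j)
--                          for a in reach(j)
--                          for r in ((a + b, a - b, a * b, a // b) if b else (a + b, a - b, a * b))}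
--             memo[i] = vals
--         return memo[i]
--
--     return next((i for i in range(1, 9) if number in reach(i)), -1)
-- ===== Notes on version B (the rewrite author's own statement) =====
-- stated objective: alternative
-- what changed: Replaces A's bottom-up defaultdict table of sets with a top-down memoized recursion reach(i) whose split combinations are collected by a single set comprehension (opposite loop nesting), and the explicit loop-with-return driver with next() over a generator.
-- outside the precondition, e.g. on solution(-2, -2): A returns 1, B returns 1
import Mathlib
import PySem

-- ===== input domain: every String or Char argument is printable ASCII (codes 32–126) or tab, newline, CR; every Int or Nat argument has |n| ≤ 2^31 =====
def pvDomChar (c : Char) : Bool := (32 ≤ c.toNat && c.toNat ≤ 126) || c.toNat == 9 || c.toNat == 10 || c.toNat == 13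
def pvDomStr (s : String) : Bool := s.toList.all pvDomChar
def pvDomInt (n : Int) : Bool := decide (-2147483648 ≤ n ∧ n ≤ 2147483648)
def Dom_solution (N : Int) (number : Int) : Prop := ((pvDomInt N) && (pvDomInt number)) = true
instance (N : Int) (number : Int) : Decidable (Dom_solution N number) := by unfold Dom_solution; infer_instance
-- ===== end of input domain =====

-- B replaces A's bottom-up defaultdict table with a top-down memoized recursion over
-- the copy count; equal return values are proved on Pre_ (0 ≤ N), where neither raises.
-- Python's 'set' is hash-based and only its MEMBERSHIP is ever consumed into the result
-- here, so both ports model the internal sets with Std.HashSet (iteration feeds only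
-- order-insensitive constructions, exactly as in the Python).

-- int(str(N) * i), total form: both Pythons contain this exact subexpression; on Pre_
-- (0 ≤ N, i ≥ 1) the parse always succeeds, so the .getD 0 default is never the value used.
def pvConcat (N : Int) (i : Int) : Int :=
  (PySem.Int.ofChars? (PySem.List.pyRepeat (PySem.Int.toChars N) i)).getD 0

-- ===== PORT A =====
-- the two inner 'for op1 … for op2 …' loops adding the four combinations
def combineA (acc s1 s2 : Std.HashSet Int) : Std.HashSet Int :=
  s1.fold (fun acc1 op1 =>
    s2.fold (fun acc2 op2 =>
      let acc3 := acc2.insert (op1 + op2)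
      let acc4 := acc3.insert (op1 - op2)
      let acc5 := acc4.insert (op1 * op2)
      if op2 ≠ 0 then acc5.insert (PySem.Int.floordiv op1 op2) else acc5) acc1) acc

-- dp is kept as the list dps with dps[j-1] = dp[j]; defaultdict's empty-set default is getD ∅
def stepA (N : Int) (dps : List (Std.HashSet Int)) (i : Nat) : Std.HashSet Int :=
  (PySem.List.pyRange 1 (i : Int) 1).foldl
    (fun acc j => combineA acc (dps.getD (j.toNat - 1) ∅) (dps.getD (i - j.toNat - 1) ∅))
    ((∅ : Std.HashSet Int).insert (pvConcat N (i : Int)))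

def loopA (N number : Int) (i : Nat) (dps : List (Std.HashSet Int)) : Int :=
  if h : i ≤ 8 then
    let s := stepA N dps i
    if s.contains number then (i : Int)
    else loopA N number (i + 1) (dps ++ [s])
  else -1
termination_by 9 - i

def solution (N : Int) (number : Int) : Int := loopA N number 1 []

-- ===== PORT B =====
-- the comprehension's generated tuple: (a+b, a-b, a*b, a//b) if b else (a+b, a-b, a*b)
def pvOps (a b : Int) : List Int :=
  if b ≠ 0 then [a + b, a - b, a * b, PySem.Int.floordiv a b] else [a + b, a - b, a * b]

-- reach(i): memoization becomes structural recursion on i; 'vals |= {comprehension}'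
-- is insertMany of the comprehension's elements
def reachB (N : Int) : (i : Nat) → Std.HashSet Int
  | i =>
    (List.range (i - 1)).attach.foldl
      (fun vals kh =>
        vals.insertMany
          ((reachB N (i - (kh.1 + 1))).toList.flatMap (fun b =>
            (reachB N (kh.1 + 1)).toList.flatMap (fun a => pvOps a b))))
      ((∅ : Std.HashSet Int).insert (pvConcat N (i : Int)))
termination_by i => i
decreasing_by
  · have := kh.2; simp [List.mem_range] at this; omega
  · have := kh.2; simp [List.mem_range] at this; omega

-- next((i for i in range(1, 9) if number in reach(i)), -1)
def solution_alt (N : Int) (number : Int) : Int :=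
  match (PySem.List.pyRange 1 9 1).find?
      (fun i => (reachB N i.toNat).contains number) with
  | some i => i
  | none => -1

-- ===== PRECONDITION & SPEC =====
-- For N < 0 Python's int(str(N)*i) raises ValueError at i = 2 in both programs, so both
-- raise unless number = N (both then return 1 at i = 1 before reaching i = 2); that thin
-- diagonal is the only excluded input on which A returns.
def Pre_solution (N : Int) (number : Int) : Prop := 0 ≤ N
instance (N : Int) (number : Int) : Decidable (Pre_solution N number) := by
  unfold Pre_solution; infer_instance
def pvWitness_solution : Int × Int := (2, 11)
def Spec_solution (N : Int) (number : Int) (out : Int) : Prop := out = solution_alt N number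
instance (N : Int) (number : Int) (out : Int) : Decidable (Spec_solution N number out) := by
  unfold Spec_solution; infer_instance

-- ===== CLAIM (what is proved, stated in full; the proofs are below) =====
def Claim_equal_solution : Prop := ∀ (N : Int) (number : Int), Dom_solution N number → Pre_solution N number → Spec_solution N number (solution N number)

-- ===== LEMMAS AND PROOFS =====

lemma mem_foldl_gen {β : Type} (g : Std.HashSet Int → β → Std.HashSet Int) (P : β → Int → Prop)
    (hg : ∀ acc y x, x ∈ g acc y ↔ x ∈ acc ∨ P y x) :
    ∀ (l : List β) (acc : Std.HashSet Int) (x : Int),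
      x ∈ l.foldl g acc ↔ x ∈ acc ∨ ∃ y ∈ l, P y x := by
  intro l
  induction l with
  | nil => simp
  | cons h t ih =>
      intro acc x
      rw [List.foldl_cons, ih, hg]
      simp only [List.mem_cons]
      constructor
      · rintro ((h1 | h1) | ⟨y, hy, hP⟩)
        · exact Or.inl h1
        · exact Or.inr ⟨h, Or.inl rfl, h1⟩
        · exact Or.inr ⟨y, Or.inr hy, hP⟩
      · rintro (h1 | ⟨y, rfl | hy, hP⟩)
        · exact Or.inl (Or.inl h1)
        · exact Or.inl (Or.inr hP)
        · exact Or.inr ⟨y, hy, hP⟩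

lemma mem_combineA (acc s1 s2 : Std.HashSet Int) (x : Int) :
    x ∈ combineA acc s1 s2 ↔ x ∈ acc ∨ ∃ a ∈ s1, ∃ b ∈ s2, x ∈ pvOps a b := by
  have hbody : ∀ (acc2 : Std.HashSet Int) (op1 op2 x : Int),
      x ∈ (let acc3 := acc2.insert (op1 + op2)
           let acc4 := acc3.insert (op1 - op2)
           let acc5 := acc4.insert (op1 * op2)
           if op2 ≠ 0 then acc5.insert (PySem.Int.floordiv op1 op2) else acc5) ↔
        x ∈ acc2 ∨ x ∈ pvOps op1 op2 := by
    intro acc2 op1 op2 x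
    by_cases hb : op2 = 0 <;> simp [pvOps, hb, Std.HashSet.mem_insert] <;> tauto
  have hinner : ∀ (acc1 : Std.HashSet Int) (op1 : Int) (x : Int),
      x ∈ s2.fold (fun acc2 op2 =>
        let acc3 := acc2.insert (op1 + op2)
        let acc4 := acc3.insert (op1 - op2)
        let acc5 := acc4.insert (op1 * op2)
        if op2 ≠ 0 then acc5.insert (PySem.Int.floordiv op1 op2) else acc5) acc1 ↔
        x ∈ acc1 ∨ ∃ b ∈ s2, x ∈ pvOps op1 b := by
    intro acc1 op1 x
    rw [Std.HashSet.fold_eq_foldl_toList]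
    rw [mem_foldl_gen _ (fun op2 x => x ∈ pvOps op1 op2) (fun a y z => hbody a op1 y z)]
    simp [Std.HashSet.mem_toList]
  unfold combineA
  rw [Std.HashSet.fold_eq_foldl_toList]
  rw [mem_foldl_gen _ (fun op1 x => ∃ b ∈ s2, x ∈ pvOps op1 b)
    (fun a y z => hinner a y z)]
  simp [Std.HashSet.mem_toList]

lemma mem_stepA (N : Int) (dps : List (Std.HashSet Int)) (i : Nat) (x : Int) :
    x ∈ stepA N dps i ↔ x = pvConcat N (i : Int) ∨
      ∃ j ∈ PySem.List.pyRange 1 (i : Int) 1,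
        ∃ a ∈ dps.getD (j.toNat - 1) ∅, ∃ b ∈ dps.getD (i - j.toNat - 1) ∅,
          x ∈ pvOps a b := by
  unfold stepA
  rw [mem_foldl_gen _
    (fun j x => ∃ a ∈ dps.getD (j.toNat - 1) ∅, ∃ b ∈ dps.getD (i - j.toNat - 1) ∅, x ∈ pvOps a b)
    (fun a j y => mem_combineA a _ _ y)]
  simp only [Std.HashSet.mem_insert, beq_iff_eq, Std.HashSet.not_mem_empty, or_false]
  exact or_congr eq_comm Iff.rfl

lemma mem_reachB (N : Int) (i : Nat) (x : Int) :
    x ∈ reachB N i ↔ x = pvConcat N (i : Int) ∨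
      ∃ k ∈ List.range (i - 1),
        ∃ b ∈ reachB N (i - (k + 1)), ∃ a ∈ reachB N (k + 1), x ∈ pvOps a b := by
  rw [reachB]
  rw [mem_foldl_gen _
    (fun (kh : {k // k ∈ List.range (i - 1)}) x =>
      ∃ b ∈ reachB N (i - (kh.1 + 1)), ∃ a ∈ reachB N (kh.1 + 1), x ∈ pvOps a b)
    (fun a kh y => by
      simp [Std.HashSet.mem_insertMany_list, List.mem_flatMap, Std.HashSet.mem_toList])]
  constructor
  · rintro (h1 | ⟨⟨k, hk⟩, _, hP⟩)
    · simp only [Std.HashSet.mem_insert, beq_iff_eq, Std.HashSet.not_mem_empty,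
        or_false] at h1
      exact Or.inl h1.symm
    · exact Or.inr ⟨k, hk, hP⟩
  · rintro (h1 | ⟨k, hk, hP⟩)
    · refine Or.inl ?_
      simp only [Std.HashSet.mem_insert, beq_iff_eq, Std.HashSet.not_mem_empty, or_false]
      exact h1.symm
    · exact Or.inr ⟨⟨k, hk⟩, List.mem_attach _ _, hP⟩

def InvA (N : Int) (dps : List (Std.HashSet Int)) (i : Nat) : Prop :=
  dps.length = i - 1 ∧
  ∀ j : Nat, 1 ≤ j → j ≤ i - 1 → ∀ x, (x ∈ dps.getD (j - 1) ∅ ↔ x ∈ reachB N j)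

lemma step_iff_reach (N : Int) (i : Nat) (dps : List (Std.HashSet Int))
    (hInv : InvA N dps i) (hi : 1 ≤ i) (x : Int) :
    x ∈ stepA N dps i ↔ x ∈ reachB N i := by
  obtain ⟨hlen, hmem⟩ := hInv
  rw [mem_stepA, mem_reachB]
  apply or_congr Iff.rfl
  constructor
  · rintro ⟨j, hj, a, ha, b, hb, hops⟩
    obtain ⟨hj1, hj2⟩ := PySem.List.mem_pyRange_one.mp hj
    have h1 : 1 ≤ j.toNat := by omega
    have h2 : j.toNat ≤ i - 1 := by omega
    refine ⟨j.toNat - 1, by simp [List.mem_range]; omega, b, ?_, a, ?_, hops⟩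
    · have hkj : j.toNat - 1 + 1 = j.toNat := by omega
      rw [hkj]
      exact (hmem (i - j.toNat) (by omega) (by omega) b).mp hb
    · have hkj : j.toNat - 1 + 1 = j.toNat := by omega
      rw [hkj]
      exact (hmem j.toNat h1 h2 a).mp ha
  · rintro ⟨k, hk, b, hb, a, ha, hops⟩
    rw [List.mem_range] at hk
    refine ⟨((k + 1 : Nat) : Int), ?_, a, ?_, b, ?_, hops⟩
    · rw [PySem.List.mem_pyRange_one]; constructor <;> [omega; exact_mod_cast (by omega : k + 1 < i)]
    · simpa using (hmem (k + 1) (by omega) (by omega) a).mpr ha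
    · simpa using (hmem (i - (k + 1)) (by omega) (by omega) b).mpr hb

lemma loopA_eq (N number : Int) :
    ∀ (n i : Nat), i + n = 9 → 1 ≤ i → ∀ dps, InvA N dps i →
      loopA N number i dps =
        (match (PySem.List.pyRange (i : Int) 9 1).find?
            (fun m => (reachB N m.toNat).contains number) with
         | some m => m
         | none => -1) := by
  intro n
  induction n with
  | zero =>
      intro i h9 h1 dps hInv
      have hi : i = 9 := by omega
      subst hi
      rw [loopA]
      simp [PySem.List.pyRange_one_eq_nil (by norm_num : (9 : Int) ≤ 9)]
  | succ n ih =>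
      intro i h9 h1 dps hInv
      have hi8 : i ≤ 8 := by omega
      rw [loopA]
      rw [dif_pos hi8]
      have hstep := step_iff_reach N i dps hInv h1
      have hcont : (stepA N dps i).contains number = (reachB N i).contains number := by
        have h1' := hstep number
        rw [← Std.HashSet.contains_iff_mem, ← Std.HashSet.contains_iff_mem] at h1'
        exact Bool.coe_iff_coe.mp h1'
      have hcons : PySem.List.pyRange (i : Int) 9 1 =
          (i : Int) :: PySem.List.pyRange ((i : Int) + 1) 9 1 :=
        PySem.List.pyRange_one_cons (by exact_mod_cast (by omega : i < 9))
      rw [hcons, List.find?_cons]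
      simp only [Int.toNat_natCast]
      cases hc : (reachB N i).contains number with
      | true => rw [hcont, hc]; simp
      | false =>
          simp only [hcont, hc, if_neg (Bool.false_ne_true)]
          have hInv' : InvA N (dps ++ [stepA N dps i]) (i + 1) := by
            obtain ⟨hlen, hmem⟩ := hInv
            refine ⟨by simp [hlen]; omega, ?_⟩
            intro j hj1 hj2 x
            rcases Nat.lt_or_ge (j - 1) dps.length with hlt | hge
            · rw [List.getD_append _ _ _ _ hlt]
              exact hmem j hj1 (by omega) x
            · have hje : j = i := by omega
              subst hje
              have hidx : j - 1 = dps.length := by omega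
              rw [hidx]
              simp only [List.getD]
              simp [hstep x]
          have := ih (i + 1) (by omega) (by omega) (dps ++ [stepA N dps i]) hInv'
          rw [this]
          have : ((i : Int) + 1) = ((i + 1 : Nat) : Int) := by push_cast; ring
          rw [this]

-- ===== VERDICT (by name: the statement is the Claim_ definition above) =====
theorem solution_spec : Claim_equal_solution := by
  intro N number _ _
  unfold Spec_solution solution solution_alt
  have h := loopA_eq N number 8 1 (by omega) (by omega) []
    ⟨rfl, by intro j hj1 hj2 x; omega⟩
  simpa using h
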